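-- pv_equiv track=rewrite | github.com/penquinspecz/SignalCraft | scripts/dev/apply_pr_governance.py | _normalize_area_labels
-- ===== SOURCE A (Python) =====
-- from typing import Iterable, Sequence
--
-- def _normalize_area_labels(labels: Iterable[str]) -> set[str]:
--     out = {label for label in labels if label.startswith("area:")}
--     non_docs_specific = {label for label in out if label not in {"area:docs", "area:unknown"}}
--     if non_docs_specific:
--         out.discard("area:docs")
--     if "area:unknown" in out and len(out) > 1:
--         out.discard("area:unknown")
--     if not out:
--         out = {"area:unknown"}
--     return out
-- ===== SOURCE B (Python) =====
-- def _normalize_area_labels(labels):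
--     specific = []
--     has_docs = False
--     for label in labels:
--         if not label.startswith("area:"):
--             continue
--         if label == "area:docs":
--             has_docs = True
--         elif label != "area:unknown" and label not in specific:
--             specific.append(label)
--     if specific:
--         return set(specific)
--     if has_docs:
--         return {"area:docs"}
--     return {"area:unknown"}
-- ===== Notes on version B (the rewrite author's own statement) =====
-- stated objective: alternative
-- what changed: Replaces A's staged set pipeline (build a set comprehension, a second comprehension over it, three conditional discard mutations, empty fallback) with one single pass over the input list keeping an ordered specific-label accumulator and a has_docs flag, followed by a priority selection.
import Mathlib
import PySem

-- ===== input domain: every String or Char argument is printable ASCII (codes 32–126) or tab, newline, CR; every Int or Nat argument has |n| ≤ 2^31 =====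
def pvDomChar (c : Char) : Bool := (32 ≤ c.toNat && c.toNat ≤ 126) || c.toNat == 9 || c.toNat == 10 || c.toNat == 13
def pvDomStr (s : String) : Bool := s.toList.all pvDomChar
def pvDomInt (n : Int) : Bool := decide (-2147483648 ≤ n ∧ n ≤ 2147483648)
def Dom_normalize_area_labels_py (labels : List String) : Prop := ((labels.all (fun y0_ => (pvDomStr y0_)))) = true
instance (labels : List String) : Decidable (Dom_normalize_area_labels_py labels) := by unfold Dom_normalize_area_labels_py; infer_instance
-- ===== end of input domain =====

-- B replaces A's staged set pipeline (two comprehensions, three conditional discards, empty fallback)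
-- with one single pass keeping an ordered specific-label accumulator and a has_docs flag, then a priority choice.

-- ===== PORT A =====
def normalize_area_labels_py (labels : List String) : List String :=
  let out := PySem.Set.ofList (labels.filter (fun label => PySem.Str.startswith label "area:"))
  let non_docs_specific := PySem.Set.ofList (out.filter (fun label => !(label == "area:docs" || label == "area:unknown")))
  let out := if 0 < non_docs_specific.length then PySem.Set.discard out "area:docs" else out
  let out := if PySem.Set.contains out "area:unknown" && decide (1 < out.length) then PySem.Set.discard out "area:unknown" else out
  if out.length == 0 then ["area:unknown"] else out

-- ===== PORT B =====
-- single pass: ordered accumulator of specific area labels (dedup on append) + has_docs flag, then priority choice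
def pvStep (st : List String × Bool) (label : String) : List String × Bool :=
  if !(PySem.Str.startswith label "area:") then st
  else if label == "area:docs" then (st.1, true)
  else if !(label == "area:unknown") && !(st.1.contains label) then (st.1 ++ [label], st.2)
  else st

def normalize_area_labels_py_alt (labels : List String) : List String :=
  let st := labels.foldl pvStep ([], false)
  if 0 < st.1.length then st.1
  else if st.2 then ["area:docs"] else ["area:unknown"]

-- ===== PRECONDITION & SPEC =====
def Spec_normalize_area_labels_py (labels : List String) (out : List String) : Prop := out = normalize_area_labels_py_alt labels
instance (labels : List String) (out : List String) : Decidable (Spec_normalize_area_labels_py labels out) := by unfold Spec_normalize_area_labels_py; infer_instance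

-- ===== CLAIM (what is proved, stated in full; the proofs are below) =====
def Claim_equal_normalize_area_labels_py : Prop := ∀ (labels : List String), Dom_normalize_area_labels_py labels → Spec_normalize_area_labels_py labels (normalize_area_labels_py labels)

-- ===== LEMMAS AND PROOFS =====

-- two distinct members of a nodup list force length > 1
lemma pv_two_le {l : List String} (hnd : l.Nodup) {a b : String}
    (ha : a ∈ l) (hb : b ∈ l) (hne : a ≠ b) : 1 < l.length := by
  rcases l with _ | ⟨x, l⟩
  · simp at ha
  · rcases l with _ | ⟨y, l⟩
    · simp at ha hb
      exact absurd (ha.trans hb.symm) hne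
    · simp [List.length_cons]

-- the set difference against {"area:docs","area:unknown"} is the plain filter
lemma pv_spec_filter (s : List String) :
    PySem.Set.diff s (PySem.Set.ofList ["area:docs", "area:unknown"]) =
    s.filter (fun label => !(label == "area:docs" || label == "area:unknown")) := by
  unfold PySem.Set.diff
  apply List.filter_congr
  intro x _
  have h2 : PySem.Set.ofList ["area:docs", "area:unknown"] = ["area:docs", "area:unknown"] := by decide
  rw [h2]
  simp only [PySem.Set.contains, List.contains_cons, List.contains_nil, Bool.or_false, Bool.not_or]

-- A's body on the deduplicated area set equals a forward priority choice
lemma pv_core_eq (s : List String) (hnd : s.Nodup) :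
    (let non_docs_specific := PySem.Set.ofList (s.filter (fun label => !(label == "area:docs" || label == "area:unknown")))
     let out := if 0 < non_docs_specific.length then PySem.Set.discard s "area:docs" else s
     let out := if PySem.Set.contains out "area:unknown" && decide (1 < out.length) then PySem.Set.discard out "area:unknown" else out
     if out.length == 0 then ["area:unknown"] else out)
    =
    (let specific := PySem.Set.diff s (PySem.Set.ofList ["area:docs", "area:unknown"])
     if 0 < specific.length then specific
     else if PySem.Set.contains s "area:docs" then ["area:docs"]
     else ["area:unknown"]) := by
  rw [pv_spec_filter,
    PySem.Set.ofList_eq_self_of_nodup _ (hnd.filter (fun label => !(label == "area:docs" || label == "area:unknown")))]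
  set q : String → Bool := fun label => !(label == "area:docs" || label == "area:unknown") with hqdef
  by_cases hq : s.filter q = []
  · -- specific empty: every element of s is "area:docs" or "area:unknown"
    have hmem : ∀ x ∈ s, x = "area:docs" ∨ x = "area:unknown" := by
      intro x hx
      have := List.filter_eq_nil_iff.mp hq x hx
      simp [hqdef] at this
      tauto
    match s with
    | [] => decide
    | [x] =>
      rcases hmem x (by simp) with h | h <;> subst h <;> decide
    | [x, y] =>
      have hxy : x ≠ y := by simp at hnd; exact hnd
      rcases hmem x (by simp) with hx | hx <;> rcases hmem y (by simp) with hy | hy <;>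
        (try (exfalso; exact hxy (hx.trans hy.symm))) <;> subst hx <;> subst hy <;> decide
    | x :: y :: z :: t =>
      exfalso
      have hne : x ≠ y ∧ x ≠ z ∧ y ≠ z := by
        simp [List.nodup_cons] at hnd
        exact ⟨hnd.1.1, hnd.1.2.1, hnd.2.1.1⟩
      rcases hmem x (by simp) with hx | hx <;> rcases hmem y (by simp) with hy | hy <;>
        rcases hmem z (by simp) with hz | hz <;>
        first
          | exact hne.1 (hx.trans hy.symm)
          | exact hne.2.1 (hx.trans hz.symm)
          | exact hne.2.2 (hy.trans hz.symm)
  · -- specific nonempty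
    have h0 : 0 < (s.filter q).length := List.length_pos_iff.mpr hq
    obtain ⟨w, hw⟩ := List.exists_mem_of_ne_nil _ hq
    have hws : w ∈ s := (List.mem_filter.mp hw).1
    have hwq : q w = true := (List.mem_filter.mp hw).2
    have hwd : w ≠ "area:docs" := by simp [hqdef] at hwq; exact fun h => hwq.1 h
    have hwu : w ≠ "area:unknown" := by simp [hqdef] at hwq; exact fun h => hwq.2 h
    simp only [if_pos h0]
    have hdisc : PySem.Set.discard s "area:docs" = s.filter (fun y => !(y == "area:docs")) := rfl
    by_cases hu : "area:unknown" ∈ s.filter (fun y => !(y == "area:docs"))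
    · -- unknown survives the docs-discard; it gets discarded too
      have hwmem : w ∈ s.filter (fun y => !(y == "area:docs")) := by
        simp [List.mem_filter, hws, hwd]
      have hlen : 1 < (PySem.Set.discard s "area:docs").length := by
        rw [hdisc]
        exact pv_two_le (hnd.filter _) hu hwmem (fun h => hwu h.symm)
      have hcont : PySem.Set.contains (PySem.Set.discard s "area:docs") "area:unknown" = true := by
        rw [hdisc]; simpa [PySem.Set.contains] using hu
      simp only [hcont, hlen, decide_true, Bool.and_self, if_pos]
      have hcomb : PySem.Set.discard (PySem.Set.discard s "area:docs") "area:unknown" = s.filter q := by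
        unfold PySem.Set.discard
        rw [List.filter_filter]
        apply List.filter_congr
        intro x _
        simp [hqdef]
        rw [Bool.and_comm]
      rw [hcomb]
      rw [if_neg]
      simp only [beq_iff_eq, List.length_eq_zero_iff]
      exact hq
    · -- unknown was never in s
      have hus : "area:unknown" ∉ s := by
        intro h
        exact hu (by simp [List.mem_filter, h])
      have hcont : PySem.Set.contains (PySem.Set.discard s "area:docs") "area:unknown" = false := by
        rw [hdisc]
        simpa [PySem.Set.contains] using hu
      simp only [hcont, Bool.false_and, if_neg (by simp : ¬ (false = true))]
      have hfd : PySem.Set.discard s "area:docs" = s.filter q := by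
        rw [hdisc]
        apply List.filter_congr
        intro x hx
        have hxu : x ≠ "area:unknown" := fun h => hus (h ▸ hx)
        simp [hqdef, hxu]
      rw [hfd, if_neg]
      simp only [beq_iff_eq, List.length_eq_zero_iff]
      exact hq

-- ofList commutes with filter
lemma pv_ofList_filter (q : String → Bool) (l : List String) :
    (PySem.Set.ofList l).filter q = PySem.Set.ofList (l.filter q) := by
  induction l with
  | nil => rfl
  | cons x l ih =>
    by_cases hq : q x = true
    · rw [PySem.Set.ofList_cons, List.filter_cons_of_pos hq, List.filter_cons_of_pos hq,
        PySem.Set.ofList_cons, ← ih]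
      congr 1
      unfold PySem.Set.discard
      rw [List.filter_filter, List.filter_filter]
      apply List.filter_congr
      intro y _
      rw [Bool.and_comm]
    · rw [PySem.Set.ofList_cons, List.filter_cons_of_neg hq, List.filter_cons_of_neg hq, ← ih]
      unfold PySem.Set.discard
      rw [List.filter_filter]
      apply List.filter_congr
      intro y _
      by_cases hyx : y = x
      · subst hyx; simp [hq]
      · simp [hyx]

-- the specific-label predicate
def pvQ (label : String) : Bool :=
  PySem.Str.startswith label "area:" && !(label == "area:docs" || label == "area:unknown")

-- step evaluation lemmas
lemma pvStep_skip (acc : List String) (d : Bool) {x : String}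
    (hp : PySem.Str.startswith x "area:" = false) : pvStep (acc, d) x = (acc, d) := by
  simp at hp
  simp [pvStep, hp]

lemma pvStep_docs (acc : List String) (d : Bool) :
    pvStep (acc, d) "area:docs" = (acc, true) := by
  simp [pvStep, show PySem.Chars.startswith ['a','r','e','a',':','d','o','c','s'] ['a','r','e','a',':'] = true from by decide]

lemma pvStep_unknown (acc : List String) (d : Bool) :
    pvStep (acc, d) "area:unknown" = (acc, d) := by
  simp [pvStep, show PySem.Chars.startswith ['a','r','e','a',':','u','n','k','n','o','w','n'] ['a','r','e','a',':'] = true from by decide]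

lemma pvStep_spec (acc : List String) (d : Bool) {x : String}
    (hp : PySem.Str.startswith x "area:" = true)
    (hd : x ≠ "area:docs") (hu : x ≠ "area:unknown") :
    pvStep (acc, d) x = (PySem.Set.add acc x, d) := by
  simp at hp
  by_cases hc : x ∈ acc
  · rw [PySem.Set.add_of_mem hc]
    simp [pvStep, hp, hd, hc]
  · rw [PySem.Set.add_of_not_mem hc]
    simp [pvStep, hp, hd, hu, hc]

lemma pvQ_skip {x : String} (hp : PySem.Str.startswith x "area:" = false) :
    pvQ x = false := by simp at hp; simp [pvQ, hp]

lemma pvQ_spec {x : String} (hp : PySem.Str.startswith x "area:" = true)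
    (hd : x ≠ "area:docs") (hu : x ≠ "area:unknown") : pvQ x = true := by
  simp at hp
  simp [pvQ, hp, hd, hu]

-- first component of B's fold: the ordered dedup of the specific area labels
lemma pv_fold_fst (labels : List String) : ∀ (acc : List String) (d : Bool),
    (labels.foldl pvStep (acc, d)).1 = PySem.Set.update acc (labels.filter pvQ) := by
  induction labels with
  | nil => intro acc d; simp [PySem.Set.update]
  | cons x l ih =>
    intro acc d
    rw [List.foldl_cons]
    by_cases hp : PySem.Str.startswith x "area:" = true
    · by_cases hd : x = "area:docs"
      · subst hd
        rw [pvStep_docs, ih, List.filter_cons_of_neg (by decide)]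
      · by_cases hu : x = "area:unknown"
        · subst hu
          rw [pvStep_unknown, ih, List.filter_cons_of_neg (by decide)]
        · rw [pvStep_spec acc d hp hd hu, ih, List.filter_cons_of_pos (pvQ_spec hp hd hu),
            PySem.Set.update_cons]
    · rw [pvStep_skip acc d (Bool.not_eq_true _ ▸ hp), ih,
        List.filter_cons_of_neg (by simp [pvQ_skip (Bool.not_eq_true _ ▸ hp)])]

-- second component of B's fold: whether "area:docs" occurs in the input
lemma pv_fold_snd (labels : List String) : ∀ (acc : List String) (d : Bool),
    (labels.foldl pvStep (acc, d)).2 = (d || labels.contains "area:docs") := by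
  induction labels with
  | nil => intro acc d; simp
  | cons x l ih =>
    intro acc d
    rw [List.foldl_cons]
    by_cases hp : PySem.Str.startswith x "area:" = true
    · by_cases hd : x = "area:docs"
      · subst hd
        rw [pvStep_docs, ih]
        simp
      · by_cases hu : x = "area:unknown"
        · subst hu
          rw [pvStep_unknown, ih]
          simp
        · rw [pvStep_spec acc d hp hd hu, ih]
          simp [Ne.symm hd]
    · have hd : x ≠ "area:docs" := by
        intro h; subst h; exact hp (by decide)
      rw [pvStep_skip acc d (Bool.not_eq_true _ ▸ hp), ih]
      simp [Ne.symm hd]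

-- membership of "area:docs" in the area set equals membership in the input
lemma pv_contains_docs (labels : List String) :
    PySem.Set.contains (PySem.Set.ofList
      (labels.filter (fun label => PySem.Str.startswith label "area:"))) "area:docs"
    = labels.contains "area:docs" := by
  simp only [PySem.Set.contains_eq_listContains, List.contains_eq_mem, PySem.Set.mem_ofList,
    List.mem_filter]
  simp [show PySem.Chars.startswith ['a','r','e','a',':','d','o','c','s'] ['a','r','e','a',':'] = true from by decide]

-- ===== VERDICT (by name: the statement is the Claim_ definition above) =====
theorem normalize_area_labels_py_spec : Claim_equal_normalize_area_labels_py := by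
  intro labels _
  unfold Spec_normalize_area_labels_py normalize_area_labels_py normalize_area_labels_py_alt
  rw [pv_core_eq _ (PySem.Set.nodup_ofList _)]
  simp only [pv_fold_fst labels [] false, pv_fold_snd labels [] false, Bool.false_or,
    PySem.Set.update_nil_left]
  rw [pv_spec_filter, pv_ofList_filter, List.filter_filter, pv_contains_docs]
  have hfe : ∀ (f g : String → Bool), (∀ x, f x = g x) →
      labels.filter f = labels.filter g := by
    intro f g h
    exact List.filter_congr (fun x _ => (h x) ▸ rfl)
  rw [hfe _ pvQ (fun x => by simp [pvQ, Bool.and_comm])]
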